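-- pv_equiv track=rewrite | github.com/psanthosh07/30-Days-of-Arrays-Linked-Lists | Day2.py | solve
-- ===== SOURCE A (Python) =====
-- def solve(A):
--     count=0
--     for i in range(len(A)):
--         s,g=False,False
--         for j in range(len(A)):
--             if i!=j:
--                 if A[j]<A[i]:
--                     s=True
--                 elif A[j]>A[i]:
--                     g=True
--         if s and g:
--                 count+=1
--     return count
-- ===== SOURCE B (Python) =====
-- def solve(A):
--     if not A:
--         return 0
--     lo = min(A)
--     hi = max(A)
--     return sum(1 for x in A if lo < x < hi)
-- ===== Notes on version B (the rewrite author's own statement) =====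
-- stated objective: faster
-- what changed: Replaces the quadratic all-pairs scan (for each element, scan the whole list for a smaller and a larger one) by computing min and max once and counting elements strictly between them in one pass.
import Mathlib
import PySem

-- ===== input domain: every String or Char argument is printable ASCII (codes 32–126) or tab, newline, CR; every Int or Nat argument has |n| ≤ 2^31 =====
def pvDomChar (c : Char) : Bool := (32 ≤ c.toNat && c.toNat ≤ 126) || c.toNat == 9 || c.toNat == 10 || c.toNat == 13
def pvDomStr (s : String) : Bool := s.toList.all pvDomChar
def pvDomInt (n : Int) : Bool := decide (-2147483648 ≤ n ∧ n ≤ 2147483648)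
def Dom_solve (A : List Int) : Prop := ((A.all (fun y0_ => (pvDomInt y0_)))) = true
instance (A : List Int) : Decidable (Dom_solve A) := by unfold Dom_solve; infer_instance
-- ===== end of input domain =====

-- B replaces A's quadratic all-pairs scan by one min/max computation and one counting pass (asymptotically faster).

-- ===== PORT A =====
def solve (A : List Int) : Int :=
  (PySem.List.pyRange 0 A.length 1).foldl (fun count i =>
    let sg := (PySem.List.pyRange 0 A.length 1).foldl (fun (sg : Bool × Bool) j =>
      if i ≠ j then
        if PySem.List.pyGetD A j 0 < PySem.List.pyGetD A i 0 then (true, sg.2)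
        else if PySem.List.pyGetD A i 0 < PySem.List.pyGetD A j 0 then (sg.1, true)
        else sg
      else sg) (false, false)
    if sg.1 && sg.2 then count + 1 else count) 0

-- ===== PORT B =====
def solve_alt (A : List Int) : Int :=
  match A with
  | [] => 0
  | x :: xs =>
    let lo := xs.foldl min x
    let hi := xs.foldl max x
    (((x :: xs).countP (fun y => decide (lo < y) && decide (y < hi)) : Nat) : Int)

-- ===== PRECONDITION & SPEC =====
def Spec_solve (A : List Int) (out : Int) : Prop := out = solve_alt A
instance (A : List Int) (out : Int) : Decidable (Spec_solve A out) := by unfold Spec_solve; infer_instance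

-- ===== CLAIM (what is proved, stated in full; the proofs are below) =====
def Claim_equal_solve : Prop := ∀ (A : List Int), Dom_solve A → Spec_solve A (solve A)

-- ===== LEMMAS AND PROOFS =====

-- the common characterisation: count of elements with some strictly smaller and some strictly larger element
def pvCount (A : List Int) : Int :=
  ((A.countP (fun y => A.any (fun z => decide (z < y)) && A.any (fun z => decide (y < z))) : Nat) : Int)

-- A's inner loop computes the two "exists smaller / exists larger among other indices" flags
lemma inner_fold (v : Int) (A : List Int) (i : Int) (js : List Int) (s g : Bool) :
    js.foldl (fun (sg : Bool × Bool) j =>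
      if i ≠ j then
        if PySem.List.pyGetD A j 0 < v then (true, sg.2)
        else if v < PySem.List.pyGetD A j 0 then (sg.1, true)
        else sg
      else sg) (s, g)
    = (s || js.any (fun j => decide (i ≠ j) && decide (PySem.List.pyGetD A j 0 < v)),
       g || js.any (fun j => decide (i ≠ j) && decide (v < PySem.List.pyGetD A j 0))) := by
  induction js generalizing s g with
  | nil => simp
  | cons j js ih =>
    simp only [List.foldl_cons, List.any_cons]
    by_cases h1 : i ≠ j
    · by_cases h2 : PySem.List.pyGetD A j 0 < v
      · have h3 : ¬ v < PySem.List.pyGetD A j 0 := by omega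
        rw [if_pos h1, if_pos h2, ih]
        simp [h1, h2, h3]
      · by_cases h3 : v < PySem.List.pyGetD A j 0
        · rw [if_pos h1, if_neg h2, if_pos h3, ih]
          simp [h1, h2, h3]
        · rw [if_pos h1, if_neg h2, if_neg h3, ih]
          simp [h1, h2, h3]
    · rw [if_neg h1, ih]
      simp [h1]

-- "some other index holds a strictly smaller value" = "some element is strictly smaller"
lemma any_other_lt (A : List Int) (i : Int) (h0 : 0 ≤ i) (h1 : i < (A.length : Int)) :
    (PySem.List.pyRange 0 (A.length : Int) 1).any
        (fun j => decide (i ≠ j) && decide (PySem.List.pyGetD A j 0 < PySem.List.pyGetD A i 0))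
    = A.any (fun z => decide (z < PySem.List.pyGetD A i 0)) := by
  apply Bool.coe_iff_coe.mp
  simp only [List.any_eq_true, PySem.List.mem_pyRange_one, Bool.and_eq_true, decide_eq_true_eq]
  constructor
  · rintro ⟨j, ⟨hj0, hjn⟩, _, hlt⟩
    exact ⟨_, PySem.List.pyGetD_mem A 0 (by constructor <;> omega), hlt⟩
  · rintro ⟨z, hz, hlt⟩
    obtain ⟨n, hn, rfl⟩ := List.mem_iff_getElem.mp hz
    have hv : PySem.List.pyGetD A ((n : Int)) 0 = A[n] := by
      rw [PySem.List.pyGetD_eq_getElem A 0 (by omega) (by omega)]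
      simp
    refine ⟨(n : Int), ⟨by omega, by omega⟩, ?_, ?_⟩
    · intro hni
      subst hni
      rw [hv] at hlt
      exact absurd hlt (lt_irrefl _)
    · rw [hv]
      exact hlt

lemma any_other_gt (A : List Int) (i : Int) (h0 : 0 ≤ i) (h1 : i < (A.length : Int)) :
    (PySem.List.pyRange 0 (A.length : Int) 1).any
        (fun j => decide (i ≠ j) && decide (PySem.List.pyGetD A i 0 < PySem.List.pyGetD A j 0))
    = A.any (fun z => decide (PySem.List.pyGetD A i 0 < z)) := by
  apply Bool.coe_iff_coe.mp
  simp only [List.any_eq_true, PySem.List.mem_pyRange_one, Bool.and_eq_true, decide_eq_true_eq]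
  constructor
  · rintro ⟨j, ⟨hj0, hjn⟩, _, hlt⟩
    exact ⟨_, PySem.List.pyGetD_mem A 0 (by constructor <;> omega), hlt⟩
  · rintro ⟨z, hz, hlt⟩
    obtain ⟨n, hn, rfl⟩ := List.mem_iff_getElem.mp hz
    have hv : PySem.List.pyGetD A ((n : Int)) 0 = A[n] := by
      rw [PySem.List.pyGetD_eq_getElem A 0 (by omega) (by omega)]
      simp
    refine ⟨(n : Int), ⟨by omega, by omega⟩, ?_, ?_⟩
    · intro hni
      subst hni
      rw [hv] at hlt
      exact absurd hlt (lt_irrefl _)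
    · rw [hv]
      exact hlt

lemma solve_eq_pvCount (A : List Int) : solve A = pvCount A := by
  unfold solve
  have hcong :
      (PySem.List.pyRange 0 (A.length : Int) 1).foldl (fun count i =>
        let sg := (PySem.List.pyRange 0 (A.length : Int) 1).foldl (fun (sg : Bool × Bool) j =>
          if i ≠ j then
            if PySem.List.pyGetD A j 0 < PySem.List.pyGetD A i 0 then (true, sg.2)
            else if PySem.List.pyGetD A i 0 < PySem.List.pyGetD A j 0 then (sg.1, true)
            else sg
          else sg) (false, false)
        if sg.1 && sg.2 then count + 1 else count) (0 : Int)
      = (PySem.List.pyRange 0 (A.length : Int) 1).foldl (fun count i =>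
          if A.any (fun z => decide (z < PySem.List.pyGetD A i 0)) &&
             A.any (fun z => decide (PySem.List.pyGetD A i 0 < z)) then count + 1 else count) (0 : Int) := by
    apply PySem.List.foldl_congr_mem
    intro acc i hi
    rw [PySem.List.mem_pyRange_one] at hi
    simp only [inner_fold, Bool.false_or]
    rw [any_other_lt A i hi.1 hi.2, any_other_gt A i hi.1 hi.2]
  have h2 : (PySem.List.pyRange 0 (A.length : Int) 1).foldl (fun count i =>
          if A.any (fun z => decide (z < PySem.List.pyGetD A i 0)) &&
             A.any (fun z => decide (PySem.List.pyGetD A i 0 < z)) then count + 1 else count) (0 : Int)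
      = pvCount A := by
    rw [PySem.List.foldl_pyRange_zero_pyGetD' A 0
          (fun count v => if A.any (fun z => decide (z < v)) && A.any (fun z => decide (v < z))
                          then count + 1 else count) (0 : Int)]
    rw [PySem.List.foldl_if_add_one]
    simp [pvCount]
  exact hcong.trans h2

lemma foldl_min_le' (xs : List Int) (x : Int) : ∀ y ∈ x :: xs, xs.foldl min x ≤ y := by
  intro y hy
  rcases List.mem_cons.mp hy with rfl | hy
  · exact (PySem.List.foldl_min_le xs y).1
  · exact (PySem.List.foldl_min_le xs x).2 y hy

lemma le_foldl_max' (xs : List Int) (x : Int) : ∀ y ∈ x :: xs, y ≤ xs.foldl max x := by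
  intro y hy
  rcases List.mem_cons.mp hy with rfl | hy
  · exact (PySem.List.le_foldl_max xs y).1
  · exact (PySem.List.le_foldl_max xs x).2 y hy

lemma solve_alt_eq_pvCount (A : List Int) : solve_alt A = pvCount A := by
  cases A with
  | nil => simp [solve_alt, pvCount]
  | cons x xs =>
    show (((x :: xs).countP
        (fun y => decide (xs.foldl min x < y) && decide (y < xs.foldl max x)) : Nat) : Int) = _
    unfold pvCount
    congr 1
    apply List.countP_congr
    intro y _
    have hlomem : xs.foldl min x ∈ x :: xs := by
      rcases PySem.List.foldl_min_mem xs x with h | h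
      · rw [h]; exact List.mem_cons_self
      · exact List.mem_cons_of_mem x h
    have hhimem : xs.foldl max x ∈ x :: xs := by
      rcases PySem.List.foldl_max_mem xs x with h | h
      · rw [h]; exact List.mem_cons_self
      · exact List.mem_cons_of_mem x h
    simp only [Bool.and_eq_true, decide_eq_true_eq, List.any_eq_true]
    constructor
    · rintro ⟨h1, h2⟩
      exact ⟨⟨_, hlomem, h1⟩, ⟨_, hhimem, h2⟩⟩
    · rintro ⟨⟨z1, hz1, h1⟩, ⟨z2, hz2, h2⟩⟩
      exact ⟨lt_of_le_of_lt (foldl_min_le' xs x z1 hz1) h1,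
             lt_of_lt_of_le h2 (le_foldl_max' xs x z2 hz2)⟩

-- ===== VERDICT (by name: the statement is the Claim_ definition above) =====
theorem solve_spec : Claim_equal_solve := by
  intro A _
  unfold Spec_solve
  rw [solve_eq_pvCount, solve_alt_eq_pvCount]
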